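-- pv_equiv track=rewrite | github.com/ThomasTrepanier/log6307-final-project | data/interim/stackoverflow/src/python/2_103.py | primepartition
-- ===== SOURCE A (Python) =====
-- def factors(n):
--     factorslist = []
--     for i in range(1, n+1, 1):
--         if n % i == 0:
--             factorslist.append(i)
--     return(factorslist)
--
-- def prime(n):
--     if factors(n) == [1, n] and n > 1:
--         return(True)
--
-- def primelist(n):
--     primenolist = []
--     for i in range(1, n+1, 1):
--         if prime(i) == True:
--             primenolist.append(i)
--     return(primenolist)
--
-- def primepartition(m):
--     if m > 0:
--         primenolist = primelist(m)
--         checklist = []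
--         for p in primenolist:
--             q = m - p
--             if q in primenolist and p > 0 and q > 0:
--                 checklist.append((p,q))
--         if len(checklist) > 0:
--             return(True)
--         else:
--             return(False)
--     else:
--         return(False)
-- ===== SOURCE B (Python) =====
-- def _isprime(n):
--     if n < 2:
--         return False
--     d = 2
--     while d * d <= n:
--         if n % d == 0:
--             return False
--         d += 1
--     return True
--
-- def primepartition(m):
--     return any(_isprime(p) and _isprime(m - p) for p in range(2, m - 1))
-- ===== Notes on version B (the rewrite author's own statement) =====
-- stated objective: faster
-- what changed: Replaces A's build-all-primes-via-full-factor-lists plus pair-collection (each primality test enumerates every divisor up to n, then a pair list is materialised) with a single early-exiting scan over p in [2, m-2] using trial division only up to sqrt(n).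
import Mathlib
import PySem

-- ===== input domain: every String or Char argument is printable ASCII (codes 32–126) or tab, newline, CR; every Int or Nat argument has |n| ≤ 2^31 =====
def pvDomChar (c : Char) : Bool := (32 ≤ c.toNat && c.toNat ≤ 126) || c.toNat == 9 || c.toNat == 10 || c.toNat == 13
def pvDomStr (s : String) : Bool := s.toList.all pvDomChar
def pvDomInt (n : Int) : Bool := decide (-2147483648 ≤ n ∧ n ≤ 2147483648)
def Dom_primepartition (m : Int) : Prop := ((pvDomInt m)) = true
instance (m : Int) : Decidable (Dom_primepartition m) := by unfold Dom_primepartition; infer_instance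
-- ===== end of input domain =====

-- B replaces A's O(m^2) build-all-primes-then-collect-pairs with one early-exiting scan
-- over p in [2, m-2] using trial division up to sqrt (objective: faster).

-- ===== PORT A =====
def pvFactors (n : Int) : List Int :=
  (PySem.List.pyRange 1 (n + 1)).foldl
    (fun acc i => if PySem.Int.mod n i = 0 then acc ++ [i] else acc) []

-- Python's `prime` returns True or None; callers only test `prime(i) == True`,
-- which is true exactly when both conditions hold, so it is ported as Bool.
def pvPrime (n : Int) : Bool :=
  decide (pvFactors n = [1, n] ∧ n > 1)

def pvPrimelist (n : Int) : List Int :=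
  (PySem.List.pyRange 1 (n + 1)).foldl
    (fun acc i => if pvPrime i then acc ++ [i] else acc) []

def primepartition (m : Int) : Bool :=
  if m > 0 then
    let primenolist := pvPrimelist m
    let checklist := primenolist.foldl
      (fun acc p =>
        let q := m - p
        if q ∈ primenolist ∧ p > 0 ∧ q > 0 then acc ++ [(p, q)] else acc) []
    if checklist.length > 0 then true else false
  else false

-- ===== PORT B =====
lemma pvGo_le {n d : Int} (h : d * d ≤ n) : d ≤ n := by
  nlinarith [mul_self_nonneg d, mul_self_nonneg (d - 1)]

def pvIsprimeGo (n d : Int) : Bool :=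
  if h : d * d ≤ n then
    if PySem.Int.mod n d = 0 then false else pvIsprimeGo n (d + 1)
  else true
termination_by (n + 1 - d).toNat
decreasing_by
  have := pvGo_le h
  omega

def pvIsprime (n : Int) : Bool :=
  if n < 2 then false else pvIsprimeGo n 2

def primepartition_alt (m : Int) : Bool :=
  (PySem.List.pyRange 2 (m - 1)).any (fun p => pvIsprime p && pvIsprime (m - p))

-- ===== PRECONDITION & SPEC =====
def Spec_primepartition (m : Int) (out : Bool) : Prop := out = primepartition_alt m
instance (m : Int) (out : Bool) : Decidable (Spec_primepartition m out) := by unfold Spec_primepartition; infer_instance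

-- ===== CLAIM (what is proved, stated in full; the proofs are below) =====
def Claim_equal_primepartition : Prop := ∀ (m : Int), Dom_primepartition m → Spec_primepartition m (primepartition m)

-- ===== LEMMAS AND PROOFS =====

-- the common mathematical reading of "prime" used to relate the two ports
def pvNP (n : Int) : Prop := 1 < n ∧ ∀ d : Int, 1 < d → d < n → ¬ d ∣ n

lemma pvFactors_eq (n : Int) :
    pvFactors n = (PySem.List.pyRange 1 (n + 1)).filter (fun i => decide (PySem.Int.mod n i = 0)) := by
  unfold pvFactors
  rw [show (fun (acc : List Int) i => if PySem.Int.mod n i = 0 then acc ++ [i] else acc)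
      = (fun acc i => if (fun j => decide (PySem.Int.mod n j = 0)) i = true then acc ++ [id i] else acc) by
    funext acc i; simp]
  rw [PySem.List.foldl_append_if]
  simp

lemma pvPrime_iff (n : Int) : pvPrime n = true ↔ pvNP n := by
  unfold pvPrime pvNP
  simp only [decide_eq_true_eq]
  constructor
  · rintro ⟨hf, hn⟩
    refine ⟨hn, fun d hd1 hdn hdvd => ?_⟩
    have hmem : d ∈ pvFactors n := by
      rw [pvFactors_eq, List.mem_filter]
      refine ⟨PySem.List.mem_pyRange_one.mpr ⟨by omega, by omega⟩, ?_⟩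
      simp [PySem.Int.mod_eq_zero_iff_dvd, hdvd]
    rw [hf] at hmem
    simp at hmem
    omega
  · rintro ⟨hn, hmid⟩
    refine ⟨?_, hn⟩
    rw [pvFactors_eq]
    have h1 : PySem.List.pyRange 1 (n + 1) = 1 :: PySem.List.pyRange 2 (n + 1) := by
      rw [PySem.List.pyRange_one_cons (by omega)]; norm_num
    have h2 : PySem.List.pyRange 2 (n + 1) = PySem.List.pyRange 2 n ++ [n] := by
      rw [PySem.List.pyRange_one_succ_right (by omega)]
    rw [h1, h2, List.filter_cons, List.filter_append]
    have hmidnil : (PySem.List.pyRange 2 n).filter (fun i => decide (PySem.Int.mod n i = 0)) = [] := by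
      rw [List.filter_eq_nil_iff]
      intro i hi
      have := PySem.List.mem_pyRange_one.mp hi
      simp only [decide_eq_true_eq, PySem.Int.mod_eq_zero_iff_dvd]
      exact hmid i (by omega) (by omega)
    rw [hmidnil]
    have hP1 : PySem.Int.mod n 1 = 0 := (PySem.Int.mod_eq_zero_iff_dvd n 1).mpr (one_dvd n)
    have hPn : PySem.Int.mod n n = 0 := (PySem.Int.mod_eq_zero_iff_dvd n n).mpr dvd_rfl
    simp [hPn]

lemma pvGo_spec : ∀ (k : Nat) (n d : Int), 2 ≤ n → 2 ≤ d → (n + 1 - d).toNat ≤ k →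
    (pvIsprimeGo n d = true ↔ ∀ e, d ≤ e → e * e ≤ n → ¬ e ∣ n) := by
  intro k
  induction k with
  | zero =>
    intro n d hn hd hk
    have hnd : ¬ d * d ≤ n := fun h => by have := pvGo_le h; omega
    rw [pvIsprimeGo, dif_neg hnd]
    constructor
    · intro _ e he hee
      exfalso
      have : d * d ≤ e * e := by nlinarith
      omega
    · intro _; rfl
  | succ k ih =>
    intro n d hn hd hk
    rw [pvIsprimeGo]
    by_cases hdd : d * d ≤ n
    · simp only [dif_pos hdd]
      by_cases hdvd : PySem.Int.mod n d = 0
      · simp only [hdvd, if_true]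
        constructor
        · intro h; exact absurd h (by simp)
        · intro h
          exact absurd ((PySem.Int.mod_eq_zero_iff_dvd n d).mp hdvd)
            (h d le_rfl hdd)
      · rw [if_neg hdvd]
        have hdn : d ≤ n := pvGo_le hdd
        rw [ih n (d + 1) hn (by omega) (by omega)]
        constructor
        · intro h e he hee hedvd
          rcases eq_or_lt_of_le he with heq | hlt
          · subst heq
            exact hdvd ((PySem.Int.mod_eq_zero_iff_dvd n d).mpr hedvd)
          · exact h e (by omega) hee hedvd
        · intro h e he hee
          exact h e (by omega) hee
    · rw [dif_neg hdd]
      constructor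
      · intro _ e he hee
        exfalso
        have : d * d ≤ e * e := by nlinarith
        omega
      · intro _; rfl

lemma pvIsprime_iff (n : Int) : pvIsprime n = true ↔ pvNP n := by
  unfold pvIsprime pvNP
  by_cases hn : n < 2
  · simp [hn]; omega
  · have hn2 : 2 ≤ n := by omega
    rw [if_neg hn, pvGo_spec (n + 1 - 2).toNat n 2 hn2 le_rfl le_rfl]
    constructor
    · intro h
      refine ⟨by omega, fun d hd1 hdn hdvd => ?_⟩
      obtain ⟨c, hc⟩ := hdvd
      have hc1 : 1 < c := by nlinarith
      by_cases hdd : d * d ≤ n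
      · exact h d (by omega) hdd ⟨c, hc⟩
      · have hcd : c < d := by nlinarith
        have hcc : c * c ≤ n := by nlinarith
        exact h c (by omega) hcc ⟨d, by rw [hc, mul_comm]⟩
    · rintro ⟨-, hmid⟩ e he hee hedvd
      have hen : e ≤ n := by nlinarith
      have hne : e ≠ n := fun hq => by rw [hq] at hee; nlinarith
      exact hmid e (by omega) (by omega) hedvd

lemma pvPrimelist_mem (n p : Int) :
    p ∈ pvPrimelist n ↔ 1 ≤ p ∧ p ≤ n ∧ pvNP p := by
  unfold pvPrimelist
  rw [show (fun (acc : List Int) i => if pvPrime i = true then acc ++ [i] else acc)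
      = (fun acc i => if pvPrime i = true then acc ++ [id i] else acc) by rfl]
  rw [PySem.List.foldl_append_if]
  simp only [List.nil_append, List.map_id, List.mem_filter, PySem.List.mem_pyRange_one]
  rw [pvPrime_iff]
  constructor
  · rintro ⟨⟨h1, h2⟩, h3⟩; exact ⟨h1, by omega, h3⟩
  · rintro ⟨h1, h2, h3⟩; exact ⟨⟨h1, by omega⟩, h3⟩

lemma primepartition_iff (m : Int) :
    primepartition m = true ↔ ∃ p, pvNP p ∧ pvNP (m - p) ∧ 2 ≤ p ∧ p ≤ m - 2 := by
  unfold primepartition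
  by_cases hm : m > 0
  · simp only [if_pos hm]
    rw [show (fun (acc : List (Int × Int)) p =>
          if m - p ∈ pvPrimelist m ∧ p > 0 ∧ m - p > 0 then acc ++ [(p, m - p)] else acc)
        = (fun acc p => if (fun q => decide (m - q ∈ pvPrimelist m ∧ q > 0 ∧ m - q > 0)) p = true
            then acc ++ [(fun q => (q, m - q)) p] else acc) by
      funext acc p; simp]
    rw [PySem.List.foldl_append_if]
    simp only [List.nil_append]
    constructor
    · intro h
      have hne : ((pvPrimelist m).filter
          (fun q => decide (m - q ∈ pvPrimelist m ∧ q > 0 ∧ m - q > 0))) ≠ [] := by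
        intro hnil
        rw [hnil] at h
        simp at h
      obtain ⟨p, hp⟩ := List.exists_mem_of_ne_nil _ hne
      rw [List.mem_filter] at hp
      obtain ⟨hpl, hcond⟩ := hp
      simp only [decide_eq_true_eq] at hcond
      obtain ⟨hql, -, -⟩ := hcond
      obtain ⟨hp1, hpm, hpNP⟩ := (pvPrimelist_mem m p).mp hpl
      obtain ⟨hq1, hqm, hqNP⟩ := (pvPrimelist_mem m (m - p)).mp hql
      exact ⟨p, hpNP, hqNP, by obtain ⟨h2, -⟩ := hpNP; omega,
        by obtain ⟨h2, -⟩ := hqNP; omega⟩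
    · rintro ⟨p, hpNP, hqNP, hp2, hpm2⟩
      have hp1 := hpNP.1
      have hq1 := hqNP.1
      have hpl : p ∈ pvPrimelist m := (pvPrimelist_mem m p).mpr ⟨by omega, by omega, hpNP⟩
      have hql : m - p ∈ pvPrimelist m := (pvPrimelist_mem m (m - p)).mpr ⟨by omega, by omega, hqNP⟩
      have hmem : p ∈ ((pvPrimelist m).filter
          (fun q => decide (m - q ∈ pvPrimelist m ∧ q > 0 ∧ m - q > 0))) := by
        rw [List.mem_filter]
        exact ⟨hpl, by simp only [decide_eq_true_eq]; exact ⟨hql, by omega, by omega⟩⟩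
      have : ((pvPrimelist m).filter
          (fun q => decide (m - q ∈ pvPrimelist m ∧ q > 0 ∧ m - q > 0))) ≠ [] := by
        intro hnil; rw [hnil] at hmem; simp at hmem
      cases hlist : (pvPrimelist m).filter
          (fun q => decide (m - q ∈ pvPrimelist m ∧ q > 0 ∧ m - q > 0)) with
      | nil => exact absurd hlist this
      | cons a l => simp
  · simp only [if_neg hm]
    constructor
    · intro h; exact absurd h (by simp)
    · rintro ⟨p, hpNP, hqNP, hp2, hpm2⟩
      exact absurd (by omega : (0:Int) < m) hm

lemma primepartition_alt_iff (m : Int) :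
    primepartition_alt m = true ↔ ∃ p, pvNP p ∧ pvNP (m - p) ∧ 2 ≤ p ∧ p ≤ m - 2 := by
  unfold primepartition_alt
  rw [List.any_eq_true]
  constructor
  · rintro ⟨p, hp, hb⟩
    rw [Bool.and_eq_true, pvIsprime_iff, pvIsprime_iff] at hb
    have := PySem.List.mem_pyRange_one.mp hp
    exact ⟨p, hb.1, hb.2, by omega, by omega⟩
  · rintro ⟨p, hpNP, hqNP, hp2, hpm2⟩
    refine ⟨p, PySem.List.mem_pyRange_one.mpr ⟨by omega, by omega⟩, ?_⟩
    rw [Bool.and_eq_true, pvIsprime_iff, pvIsprime_iff]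
    exact ⟨hpNP, hqNP⟩

-- ===== VERDICT (by name: the statement is the Claim_ definition above) =====
theorem primepartition_spec : Claim_equal_primepartition := by
  intro m _
  unfold Spec_primepartition
  by_cases h : primepartition m = true
  · rw [h, Eq.comm, primepartition_alt_iff, ← primepartition_iff]
    exact h
  · have h' : primepartition m = false := by
      cases hq : primepartition m
      · rfl
      · exact absurd hq h
    rw [h']
    by_cases h2 : primepartition_alt m = true
    · exact absurd ((primepartition_iff m).mpr ((primepartition_alt_iff m).mp h2)) h
    · cases hq : primepartition_alt m
      · rfl
      · exact absurd hq h2
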